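-- pv_equiv track=rewrite | github.com/gle-bellier/internship-expressive-DDSP | audio-to-midi/get_contours.py | onset_offset
-- ===== SOURCE A (Python) =====
-- def onset_offset(dm, max_silence):
--     l = []
--     silence = {"on" : 0, "off": None}
--     for i in range(len(dm)-1):
--
--         if dm[i]==True and dm[i+1]==False:
--             silence["on"]=i
--
--
--         if dm[i]==False and dm[i+1]==True:
--             silence["off"]=i
--             if silence["off"] - silence["on"]>max_silence:
--                 l.append(silence)
--             silence = {"on" : None, "off": None}
--     return l
-- ===== SOURCE B (Python) =====
-- def onset_offset(dm, max_silence):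
--     n = len(dm)
--     falls = [i for i in range(n - 1) if dm[i] == True and dm[i + 1] == False]
--     rises = [i for i in range(n - 1) if dm[i] == False and dm[i + 1] == True]
--     out = []
--     j = 0
--     onset = 0
--     for r in rises:
--         while j < len(falls) and falls[j] < r:
--             onset = falls[j]
--             j += 1
--         if r - onset > max_silence:
--             out.append({"on": onset, "off": r})
--     return out
-- ===== Notes on version B (the rewrite author's own statement) =====
-- stated objective: alternative
-- what changed: Replaces A's single stateful sweep mutating a silence dict with two precomputed edge-index lists (falling and rising edges) merged by a pointer walk that tracks the most recent falling edge before each rising edge.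
import Mathlib
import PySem

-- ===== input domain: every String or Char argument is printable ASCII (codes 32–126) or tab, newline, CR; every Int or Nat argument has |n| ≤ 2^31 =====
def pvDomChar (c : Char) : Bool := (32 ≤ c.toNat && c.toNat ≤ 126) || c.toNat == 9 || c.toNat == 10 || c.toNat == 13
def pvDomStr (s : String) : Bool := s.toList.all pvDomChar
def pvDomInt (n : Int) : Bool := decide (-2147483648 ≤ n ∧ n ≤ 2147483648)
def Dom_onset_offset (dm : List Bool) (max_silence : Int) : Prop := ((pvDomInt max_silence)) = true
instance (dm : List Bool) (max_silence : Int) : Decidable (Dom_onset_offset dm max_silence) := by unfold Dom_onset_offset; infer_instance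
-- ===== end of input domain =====

-- B replaces A's single stateful sweep with two precomputed edge-index lists merged by a
-- pointer walk (objective: alternative decomposition, same O(n) cost). Proved equal on all inputs.

-- ===== PORT A =====
-- the dict {"on": o, "off": f} in insertion order (its values are ints whenever it is appended)
def pvMkSil (o f : Int) : List (String × Int) := [("on", o), ("off", f)]

-- A's loop 'for i in range(len(dm)-1)' visiting (dm[i], dm[i+1]) as structural recursion over the
-- same state: accumulator l and the dict's "on" field (Option Int: None after the reset).
-- The "off" field is written and read in the same iteration and is inlined as 'i'.
def onsetGoA (ms : Int) : List Bool → Int → List (List (String × Int)) → Option Int → List (List (String × Int))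
  | x :: y :: rest, i, l, on? =>
    let on?' := if x == true && y == false then some i else on?
    if x == false && y == true then
      match on?' with
      | some o => onsetGoA ms (y :: rest) (i + 1) (if i - o > ms then l ++ [pvMkSil o i] else l) none
      | none   =>
        -- Python would raise TypeError (None - int) here; unreachable for a Bool list, since
        -- "on" is 0 initially and is always set by a falling edge before any later rising edge.
        onsetGoA ms (y :: rest) (i + 1) l none
    else onsetGoA ms (y :: rest) (i + 1) l on?'
  | _, _, l, _ => l

def onset_offset (dm : List Bool) (max_silence : Int) : List (List (String × Int)) :=
  onsetGoA max_silence dm 0 [] (some 0)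

-- ===== PORT B =====
-- falling-edge indices: i with dm[i]==True and dm[i+1]==False
def pvFalls : List Bool → Int → List Int
  | x :: y :: rest, i => (if x == true && y == false then [i] else []) ++ pvFalls (y :: rest) (i + 1)
  | _, _ => []

-- rising-edge indices: i with dm[i]==False and dm[i+1]==True
def pvRises : List Bool → Int → List Int
  | x :: y :: rest, i => (if x == false && y == true then [i] else []) ++ pvRises (y :: rest) (i + 1)
  | _, _ => []

-- the inner 'while j < len(falls) and falls[j] < r' walk (pointer = consumed prefix of falls)
def pvAdvance : List Int → Int → Int → List Int × Int
  | [], onset, _ => ([], onset)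
  | f :: fs, onset, r => if f < r then pvAdvance fs f r else (f :: fs, onset)

-- the 'for r in rises' loop of B
def pvMerge (ms : Int) : List Int → List Int → Int → List (List (String × Int))
  | [], _, _ => []
  | r :: rs, falls, onset =>
    let p := pvAdvance falls onset r
    (if r - p.2 > ms then [pvMkSil p.2 r] else []) ++ pvMerge ms rs p.1 p.2

def onset_offset_alt (dm : List Bool) (max_silence : Int) : List (List (String × Int)) :=
  pvMerge max_silence (pvRises dm 0) (pvFalls dm 0) 0

-- ===== PRECONDITION & SPEC =====
def Spec_onset_offset (dm : List Bool) (max_silence : Int) (out : List (List (String × Int))) : Prop := out = onset_offset_alt dm max_silence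
instance (dm : List Bool) (max_silence : Int) (out : List (List (String × Int))) : Decidable (Spec_onset_offset dm max_silence out) := by unfold Spec_onset_offset; infer_instance

-- ===== CLAIM (what is proved, stated in full; the proofs are below) =====
def Claim_equal_onset_offset : Prop := ∀ (dm : List Bool) (max_silence : Int), Dom_onset_offset dm max_silence → Spec_onset_offset dm max_silence (onset_offset dm max_silence)

-- ===== LEMMAS AND PROOFS =====

-- every edge index produced on a suffix starting at i is ≥ i
lemma mem_falls_ge : ∀ (s : List Bool) (i j : Int), j ∈ pvFalls s i → i ≤ j := by
  intro s
  induction s with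
  | nil => intro i j h; simp [pvFalls] at h
  | cons x rest ih =>
    intro i j h
    cases rest with
    | nil => simp [pvFalls] at h
    | cons y t =>
      simp only [pvFalls, List.mem_append] at h
      rcases h with h | h
      · split at h <;> simp_all
      · have := ih (i + 1) j h; omega

lemma mem_rises_ge : ∀ (s : List Bool) (i j : Int), j ∈ pvRises s i → i ≤ j := by
  intro s
  induction s with
  | nil => intro i j h; simp [pvRises] at h
  | cons x rest ih =>
    intro i j h
    cases rest with
    | nil => simp [pvRises] at h
    | cons y t =>
      simp only [pvRises, List.mem_append] at h
      rcases h with h | h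
      · split at h <;> simp_all
      · have := ih (i + 1) j h; omega

-- if no element of falls is < r, the advance walk moves nothing
lemma advance_nopop (falls : List Int) (o r : Int) (h : ∀ f ∈ falls, ¬ f < r) :
    pvAdvance falls o r = (falls, o) := by
  cases falls with
  | nil => rfl
  | cons f fs => simp [pvAdvance, h f (by simp)]

-- a falling edge i strictly before every rising edge is consumed immediately and becomes the onset
lemma merge_pop (ms : Int) (rises fl : List Int) (i o : Int) (h : ∀ r ∈ rises, i < r) :
    pvMerge ms rises (i :: fl) o = pvMerge ms rises fl i := by
  cases rises with
  | nil => rfl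
  | cons r rs => simp [pvMerge, pvAdvance, h r (by simp)]

-- main invariant: A's sweep with state (l, on?) equals l ++ B's merge of the suffix's edge lists,
-- where (1) on? = some o ⇒ merge onset is o, and (2) on? = none only after a rise (head = true),
-- in which case the merge result is independent of the onset value.
lemma main_inv (ms : Int) : ∀ (s : List Bool) (x : Bool) (i : Int) (l : List (List (String × Int))),
    (∀ o, onsetGoA ms (x :: s) i l (some o) =
        l ++ pvMerge ms (pvRises (x :: s) i) (pvFalls (x :: s) i) o) ∧
    (x = true → ∀ o, onsetGoA ms (x :: s) i l none =
        l ++ pvMerge ms (pvRises (x :: s) i) (pvFalls (x :: s) i) o) := by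
  intro s
  induction s with
  | nil =>
    intro x i l
    constructor
    · intro o; simp [onsetGoA, pvRises, pvFalls, pvMerge]
    · intro _ o; simp [onsetGoA, pvRises, pvFalls, pvMerge]
  | cons y t ih =>
    intro x i l
    have hrge : ∀ r ∈ pvRises (y :: t) (i + 1), i < r := by
      intro r hr; have := mem_rises_ge (y :: t) (i + 1) r hr; omega
    have hfge : ∀ f ∈ pvFalls (y :: t) (i + 1), ¬ f < i := by
      intro f hf; have := mem_falls_ge (y :: t) (i + 1) f hf; omega
    cases x <;> cases y
    · -- x = false, y = false : no edge
      constructor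
      · intro o
        simp only [onsetGoA, pvRises, pvFalls]
        simpa using (ih false (i + 1) l).1 o
      · intro hx; exact absurd hx (by simp)
    · -- x = false, y = true : rising edge at i
      constructor
      · intro o
        simp only [onsetGoA, pvRises, pvFalls]
        simp only [show ((false == true && true == false) = false) from rfl,
          show ((false == false && true == true) = true) from rfl]
        simp only [Bool.false_eq_true, if_false, if_true, List.nil_append, List.singleton_append]
        rw [(ih true (i + 1) (if i - o > ms then l ++ [pvMkSil o i] else l)).2 rfl o]
        simp only [pvMerge, advance_nopop _ o i hfge]
        split <;> simp
      · intro hx; exact absurd hx (by simp)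
    · -- x = true, y = false : falling edge at i
      constructor
      · intro o
        simp only [onsetGoA]
        simp only [show ((true == true && false == false) = true) from rfl,
          show ((true == false && false == true) = false) from rfl]
        simp only [if_true, Bool.false_eq_true, if_false]
        rw [(ih false (i + 1) l).1 i]
        simp only [pvRises, pvFalls]
        simp only [show ((true == false && false == true) = false) from rfl,
          show ((true == true && false == false) = true) from rfl]
        simp only [Bool.false_eq_true, if_false, if_true, List.nil_append, List.singleton_append]
        rw [merge_pop ms _ _ i o hrge]
      · intro _ o
        simp only [onsetGoA]
        simp only [show ((true == true && false == false) = true) from rfl,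
          show ((true == false && false == true) = false) from rfl]
        simp only [if_true, Bool.false_eq_true, if_false]
        rw [(ih false (i + 1) l).1 i]
        simp only [pvRises, pvFalls]
        simp only [show ((true == false && false == true) = false) from rfl,
          show ((true == true && false == false) = true) from rfl]
        simp only [Bool.false_eq_true, if_false, if_true, List.nil_append, List.singleton_append]
        rw [merge_pop ms _ _ i o hrge]
    · -- x = true, y = true : no edge
      constructor
      · intro o
        simp only [onsetGoA, pvRises, pvFalls]
        simpa using (ih true (i + 1) l).1 o
      · intro _ o
        simp only [onsetGoA, pvRises, pvFalls]
        simpa using (ih true (i + 1) l).2 rfl o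

-- ===== VERDICT (by name: the statement is the Claim_ definition above) =====
theorem onset_offset_spec : Claim_equal_onset_offset := by
  intro dm ms _
  unfold Spec_onset_offset onset_offset onset_offset_alt
  cases dm with
  | nil => rfl
  | cons x s => simpa using (main_inv ms s x 0 []).1 0
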